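-- pv_equiv track=rewrite | github.com/anubhavgpta/Alara | alara/capabilities/coding.py | _extract_git_subcmd
-- ===== SOURCE A (Python) =====
-- READ_GIT_OPS: frozenset[str] = frozenset(
--     {"status", "diff", "log", "show", "blame"}
-- )
--
-- def _extract_git_subcmd(user_input: str) -> str | None:
--     """Return the git subcommand found in user_input, or None."""
--     words = user_input.lower().split()
--     for i, word in enumerate(words):
--         if word == "git" and i + 1 < len(words):
--             return words[i + 1].strip(".,;:")
--     # Fallback: check if any read/write subcommand word appears directly.
--     for word in words:
--         candidate = word.strip(".,;:")
--         if candidate in READ_GIT_OPS or candidate in (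
--             "commit", "push", "pull", "merge", "rebase", "reset",
--             "branch", "checkout", "add", "stash", "tag",
--         ):
--             return candidate
--     return None
-- ===== SOURCE B (Python) =====
-- GIT_SUBCMDS = frozenset({
--     "status", "diff", "log", "show", "blame",
--     "commit", "push", "pull", "merge", "rebase", "reset",
--     "branch", "checkout", "add", "stash", "tag",
-- })
--
-- def _extract_git_subcmd(user_input: str) -> str | None:
--     """Single pass: 'git <word>' wins immediately; else first known subcommand word."""
--     words = user_input.lower().split()
--     found = None
--     for i, word in enumerate(words):
--         if word == "git" and i + 1 < len(words):
--             return words[i + 1].strip(".,;:")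
--         if found is None:
--             cand = word.strip(".,;:")
--             if cand in GIT_SUBCMDS:
--                 found = cand
--     return found
-- ===== Notes on version B (the rewrite author's own statement) =====
-- stated objective: simpler
-- what changed: Fuses A's two sequential scans (the git-keyword scan and the fallback subcommand scan) into one single pass that returns immediately when the git keyword has a following word and otherwise stores the first stripped word belonging to one merged subcommand set, returned after the loop.
import Mathlib
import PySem

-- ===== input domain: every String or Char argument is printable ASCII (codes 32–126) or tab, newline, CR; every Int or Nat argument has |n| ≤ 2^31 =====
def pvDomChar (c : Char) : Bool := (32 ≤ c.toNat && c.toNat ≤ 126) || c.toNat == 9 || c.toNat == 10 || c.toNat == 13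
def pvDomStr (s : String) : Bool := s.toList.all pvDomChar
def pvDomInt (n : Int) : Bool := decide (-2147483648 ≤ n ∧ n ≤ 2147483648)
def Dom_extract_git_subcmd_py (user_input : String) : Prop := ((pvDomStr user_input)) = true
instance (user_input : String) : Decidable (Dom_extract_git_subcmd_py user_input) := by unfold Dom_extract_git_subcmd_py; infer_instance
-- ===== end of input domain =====

-- B fuses A's two sequential scans into one pass storing the first fallback candidate (objective: simpler single traversal; same asymptotic cost).

-- ===== PORT A =====
def pvReadGitOps : List String := ["status", "diff", "log", "show", "blame"]

def pvWriteGitOps : List String :=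
  ["commit", "push", "pull", "merge", "rebase", "reset",
   "branch", "checkout", "add", "stash", "tag"]

-- first loop: 'git' followed by another word ('i + 1 < len(words)' = a next word exists)
def pvGitScan : List String → Option String
  | w :: next :: rest =>
      if w = "git" then some (PySem.Str.stripChars next ".,;:")
      else pvGitScan (next :: rest)
  | _ => none

-- second loop: first word whose stripped form is a known subcommand
def pvFallbackScan : List String → Option String
  | [] => none
  | w :: rest =>
      let candidate := PySem.Str.stripChars w ".,;:"
      if candidate ∈ pvReadGitOps ∨ candidate ∈ pvWriteGitOps then some candidate
      else pvFallbackScan rest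

def extract_git_subcmd_py (user_input : String) : Option String :=
  let words := PySem.Str.split₀ (PySem.Str.lower user_input)
  match pvGitScan words with
  | some s => some s
  | none => pvFallbackScan words

-- ===== PORT B =====
def pvGitSubcmds : List String :=
  ["status", "diff", "log", "show", "blame",
   "commit", "push", "pull", "merge", "rebase", "reset",
   "branch", "checkout", "add", "stash", "tag"]

-- 'if found is None: …' step of the single pass
def pvUpd (found : Option String) (w : String) : Option String :=
  match found with
  | some c => some c
  | none =>
      let cand := PySem.Str.stripChars w ".,;:"
      if cand ∈ pvGitSubcmds then some cand else none

-- the single fused loop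
def pvLoop : List String → Option String → Option String
  | [], found => found
  | [w], found => pvUpd found w
  | w :: next :: rest, found =>
      if w = "git" then some (PySem.Str.stripChars next ".,;:")
      else pvLoop (next :: rest) (pvUpd found w)

def extract_git_subcmd_py_alt (user_input : String) : Option String :=
  pvLoop (PySem.Str.split₀ (PySem.Str.lower user_input)) none

-- ===== PRECONDITION & SPEC =====
def Spec_extract_git_subcmd_py (user_input : String) (out : Option String) : Prop := out = extract_git_subcmd_py_alt user_input
instance (user_input : String) (out : Option String) : Decidable (Spec_extract_git_subcmd_py user_input out) := by unfold Spec_extract_git_subcmd_py; infer_instance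

-- ===== CLAIM (what is proved, stated in full; the proofs are below) =====
def Claim_equal_extract_git_subcmd_py : Prop := ∀ (user_input : String), Dom_extract_git_subcmd_py user_input → Spec_extract_git_subcmd_py user_input (extract_git_subcmd_py user_input)

-- ===== LEMMAS AND PROOFS =====

lemma pvMem_subcmds (c : String) :
    (c ∈ pvGitSubcmds) ↔ (c ∈ pvReadGitOps ∨ c ∈ pvWriteGitOps) := by
  have h : pvGitSubcmds = pvReadGitOps ++ pvWriteGitOps := rfl
  rw [h, List.mem_append]

-- single-pass invariant: the fused loop equals "git scan, else stored candidate, else fallback scan"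
lemma pvLoop_eq (ws : List String) (found : Option String) :
    pvLoop ws found =
      match pvGitScan ws with
      | some s => some s
      | none =>
        match found with
        | some c => some c
        | none => pvFallbackScan ws := by
  induction ws generalizing found with
  | nil => cases found <;> rfl
  | cons w rest ih =>
    cases rest with
    | nil =>
      cases found with
      | some c => simp [pvLoop, pvGitScan, pvUpd]
      | none =>
        show pvUpd none w = _
        simp only [pvGitScan, pvUpd, pvFallbackScan, pvMem_subcmds]
    | cons next rest' =>
      by_cases hw : w = "git"
      · simp [pvLoop, pvGitScan, hw]
      · have hG : pvGitScan (w :: next :: rest') = pvGitScan (next :: rest') := by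
          simp [pvGitScan, hw]
        rw [show pvLoop (w :: next :: rest') found
              = pvLoop (next :: rest') (pvUpd found w) from by simp [pvLoop, hw],
            ih, hG]
        cases hg : pvGitScan (next :: rest') with
        | some s => rfl
        | none =>
          cases found with
          | some c => rfl
          | none =>
            show (match pvUpd none w with
                  | some c => some c
                  | none => pvFallbackScan (next :: rest')) =
                 pvFallbackScan (w :: next :: rest')
            rw [show pvFallbackScan (w :: next :: rest')
                  = (if PySem.Str.stripChars w ".,;:" ∈ pvReadGitOps ∨
                        PySem.Str.stripChars w ".,;:" ∈ pvWriteGitOps then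
                       some (PySem.Str.stripChars w ".,;:")
                     else pvFallbackScan (next :: rest')) from rfl]
            simp only [pvUpd, pvMem_subcmds]
            by_cases hc : PySem.Str.stripChars w ".,;:" ∈ pvReadGitOps ∨
                PySem.Str.stripChars w ".,;:" ∈ pvWriteGitOps <;> simp [hc]

-- ===== VERDICT (by name: the statement is the Claim_ definition above) =====
theorem extract_git_subcmd_py_spec : Claim_equal_extract_git_subcmd_py := by
  intro u _
  unfold Spec_extract_git_subcmd_py extract_git_subcmd_py extract_git_subcmd_py_alt
  rw [pvLoop_eq]
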